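-- pv_equiv track=rewrite | github.com/Hansen-Labs/ARTseqFISH | ARTseqFISH.py | CodeDistance
-- ===== SOURCE A (Python) =====
-- def CodeDistance(c,r):
--     if c == r:
--         return 0
--     """the code that we have"""
--     code      = {}
--
--     """the reference set"""
--     reference = {}
--
--     rounds = []
--     """the split in the code"""
--     rsplit = c.split('_')
--     for i in rsplit:
--         rnd,clrs = i.split('.')
--         rounds.append(rnd)
--         code[rnd] = clrs
--
--     rsplit = r.split('_')
--     for i in rsplit:
--         rnd,clrs = i.split('.')
--         rounds.append(rnd)
--         reference[rnd] = clrs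
--
--     """the rounds in the set"""
--     rnd = list(set(rounds))
--
--     diff = 0
--     for i in rnd:
--         clc = False
--         clr = False
--         try:
--             clc = code[i]
--         except KeyError:
--             pass
--         try:
--               clr = reference[i]
--         except KeyError:
--             pass
--
--         if clc != False and clr == False:
--             diff += len(clc)
--
--         elif clc == False and clr != False:
--             diff += len(clr)
--
--         elif clc != False and clr != False:
--             length  = 2*len([i for i in clc if i in clr])
--             diff   += len(clc) + len(clr) - length
--     return diff
-- ===== SOURCE B (Python) =====
-- def CodeDistance(c, r):
--     if c == r:
--         return 0
--     code = {}
--     for seg in c.split('_'):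
--         rnd, clrs = seg.split('.')
--         code[rnd] = clrs
--     reference = {}
--     for seg in r.split('_'):
--         rnd, clrs = seg.split('.')
--         reference[rnd] = clrs
--     total = sum(len(v) for v in code.values()) + sum(len(v) for v in reference.values())
--     for rnd, clrs in code.items():
--         if rnd in reference:
--             total -= 2 * len([ch for ch in clrs if ch in reference[rnd]])
--     return total
-- ===== Notes on version B (the rewrite author's own statement) =====
-- stated objective: simpler
-- what changed: Instead of collecting all round names into a list, deduplicating them via set() and branching per round on presence in each dict, B sums the value lengths of both dicts directly and subtracts twice the per-round overlap in a single pass over the code dict's items.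
import Mathlib
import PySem

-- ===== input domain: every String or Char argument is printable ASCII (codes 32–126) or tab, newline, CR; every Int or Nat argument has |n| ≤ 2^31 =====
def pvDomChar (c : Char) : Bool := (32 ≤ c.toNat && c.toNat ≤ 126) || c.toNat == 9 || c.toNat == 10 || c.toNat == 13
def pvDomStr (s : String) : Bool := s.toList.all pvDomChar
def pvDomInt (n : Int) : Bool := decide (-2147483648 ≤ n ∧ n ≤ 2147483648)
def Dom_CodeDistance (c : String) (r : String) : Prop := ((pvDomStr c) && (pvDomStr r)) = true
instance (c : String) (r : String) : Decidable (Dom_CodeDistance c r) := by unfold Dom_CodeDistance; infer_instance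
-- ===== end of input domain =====

-- B replaces A's round-list + set() + per-round presence branching by two value-length sums
-- over the dicts plus one overlap-subtraction pass over the code dict (objective: simpler).

-- ===== PORT A =====
def CodeDistance (c : String) (r : String) : Int :=
  if c == r then 0 else
  -- first loop: rounds.append(rnd); code[rnd] = clrs   (pair state (rounds, code))
  let state1 := (PySem.Chars.splitOn c.toList ['_']).foldl
    (fun s i =>
      let parts := PySem.Chars.splitOn i ['.']
      (s.1 ++ [parts.getD 0 []], s.2.insert (parts.getD 0 []) (parts.getD 1 [])))
    (([] : List (List Char)), (PySem.Dict.empty : PySem.Dict (List Char) (List Char)))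
  let code := state1.2
  -- second loop: rounds.append(rnd); reference[rnd] = clrs
  let state2 := (PySem.Chars.splitOn r.toList ['_']).foldl
    (fun s i =>
      let parts := PySem.Chars.splitOn i ['.']
      (s.1 ++ [parts.getD 0 []], s.2.insert (parts.getD 0 []) (parts.getD 1 [])))
    (state1.1, (PySem.Dict.empty : PySem.Dict (List Char) (List Char)))
  let reference := state2.2
  -- rnd = list(set(rounds)); the loop below only sums, so the set's iteration order is immaterial
  let rnd : PySem.Set (List Char) := PySem.Set.ofList state2.1
  rnd.foldl (fun diff i =>
    let clc := code.get? i
    let clr := reference.get? i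
    match clc, clr with
    | some a, none => diff + PySem.List.len a
    | none, some b => diff + PySem.List.len b
    | some a, some b =>
        diff + (PySem.List.len a + PySem.List.len b
          - 2 * PySem.List.len (a.filter (fun ch => b.contains ch)))
    | none, none => diff) 0

-- ===== PORT B =====
def CodeDistance_alt (c : String) (r : String) : Int :=
  if c == r then 0 else
  let code := (PySem.Chars.splitOn c.toList ['_']).foldl
    (fun d seg =>
      let parts := PySem.Chars.splitOn seg ['.']
      d.insert (parts.getD 0 []) (parts.getD 1 []))
    (PySem.Dict.empty : PySem.Dict (List Char) (List Char))
  let reference := (PySem.Chars.splitOn r.toList ['_']).foldl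
    (fun d seg =>
      let parts := PySem.Chars.splitOn seg ['.']
      d.insert (parts.getD 0 []) (parts.getD 1 []))
    (PySem.Dict.empty : PySem.Dict (List Char) (List Char))
  let total := (code.values.map PySem.List.len).sum + (reference.values.map PySem.List.len).sum
  code.items.foldl (fun t p =>
    if reference.contains p.1 then
      t - 2 * PySem.List.len (p.2.filter (fun ch => (reference.getD p.1 []).contains ch))
    else t) total

-- ===== PRECONDITION & SPEC =====
-- Pre_ excludes exactly the inputs on which the Python A raises ValueError: unless c == r
-- (early return), every '_'-segment of both strings must split on '.' into exactly two parts.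
def Pre_CodeDistance (c : String) (r : String) : Prop :=
  c = r ∨ ((∀ seg ∈ PySem.Chars.splitOn c.toList ['_'], (PySem.Chars.splitOn seg ['.']).length = 2)
        ∧ (∀ seg ∈ PySem.Chars.splitOn r.toList ['_'], (PySem.Chars.splitOn seg ['.']).length = 2))
instance (c : String) (r : String) : Decidable (Pre_CodeDistance c r) := by
  unfold Pre_CodeDistance; infer_instance

def pvWitness_CodeDistance : String × String := ("1.ab_2.c", "1.b_3.dd")

def Spec_CodeDistance (c : String) (r : String) (out : Int) : Prop := out = CodeDistance_alt c r
instance (c : String) (r : String) (out : Int) : Decidable (Spec_CodeDistance c r out) := by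
  unfold Spec_CodeDistance; infer_instance

-- ===== CLAIM (what is proved, stated in full; the proofs are below) =====
def Claim_equal_CodeDistance : Prop := ∀ (c : String) (r : String), Dom_CodeDistance c r → Pre_CodeDistance c r → Spec_CodeDistance c r (CodeDistance c r)

-- ===== LEMMAS AND PROOFS =====

-- proof-side abbreviations for the shared parsing step
def pvKey (seg : List Char) : List Char := (PySem.Chars.splitOn seg ['.']).getD 0 []
def pvVal (seg : List Char) : List Char := (PySem.Chars.splitOn seg ['.']).getD 1 []
def pvIns (d : PySem.Dict (List Char) (List Char)) (seg : List Char) :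
    PySem.Dict (List Char) (List Char) :=
  d.insert (pvKey seg) (pvVal seg)
-- overlap count: 2nd-argument-membership filter of the 1st, as both ports compute it
def pvOv (a b : List Char) : Int := PySem.List.len (a.filter (fun ch => b.contains ch))
-- per-round contributions
def pvG (d : PySem.Dict (List Char) (List Char)) (k : List Char) : Int :=
  match d.get? k with | some a => (a.length : Int) | none => 0
def pvW (d e : PySem.Dict (List Char) (List Char)) (k : List Char) : Int :=
  match d.get? k, e.get? k with | some a, some b => pvOv a b | _, _ => 0

-- A's pair-state parsing fold splits into the appended key list and the dict fold
theorem pvParseA (l : List (List Char)) (racc : List (List Char))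
    (d : PySem.Dict (List Char) (List Char)) :
    l.foldl (fun s i =>
      let parts := PySem.Chars.splitOn i ['.']
      (s.1 ++ [parts.getD 0 []], s.2.insert (parts.getD 0 []) (parts.getD 1 [])))
      (racc, d)
    = (racc ++ l.map pvKey, l.foldl pvIns d) := by
  induction l generalizing racc d with
  | nil => simp
  | cons x xs ih => rw [List.foldl_cons, ih]; simp [pvIns, pvKey, pvVal]

theorem pvKeysFold (l : List (List Char)) (d : PySem.Dict (List Char) (List Char)) (k : List Char) :
    k ∈ (l.foldl pvIns d).keys ↔ k ∈ d.keys ∨ k ∈ l.map pvKey := by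
  induction l generalizing d with
  | nil => simp
  | cons x xs ih =>
      simp only [List.foldl_cons, List.map_cons, List.mem_cons, ih, pvIns,
        PySem.Dict.mem_keys_insert]
      tauto

theorem pvNodupFold (l : List (List Char)) (d : PySem.Dict (List Char) (List Char))
    (h : d.keys.Nodup) : (l.foldl pvIns d).keys.Nodup := by
  induction l generalizing d with
  | nil => exact h
  | cons x xs ih => exact ih _ (PySem.Dict.nodup_keys_insert _ _ _ h)

-- sum of a function vanishing off a sublist: over any nodup superlist it equals the sum over the keys
theorem pvSumRestrict (S K : List (List Char)) (f : List Char → Int)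
    (hS : S.Nodup) (hK : K.Nodup) (hsub : ∀ k ∈ K, k ∈ S)
    (hz : ∀ k ∈ S, k ∉ K → f k = 0) :
    (S.map f).sum = (K.map f).sum := by
  have hperm : (S.filter (fun k => decide (k ∈ K))).Perm K := by
    rw [List.perm_ext_iff_of_nodup (hS.filter _) hK]
    intro a
    simp only [List.mem_filter, decide_eq_true_eq]
    exact ⟨fun h => h.2, fun h => ⟨hsub a h, h⟩⟩
  have hsplit : ((S.filter (fun k => decide (k ∈ K))).map f).sum
      + ((S.filter (fun k => !decide (k ∈ K))).map f).sum = (S.map f).sum := by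
    have := (List.filter_append_perm (fun k => decide (k ∈ K)) S).map f
    calc ((S.filter (fun k => decide (k ∈ K))).map f).sum
        + ((S.filter (fun k => !decide (k ∈ K))).map f).sum
        = (((S.filter (fun k => decide (k ∈ K))).map f)
          ++ ((S.filter (fun k => !decide (k ∈ K))).map f)).sum := by
          rw [List.sum_append]
      _ = (S.map f).sum := by
          rw [← List.map_append]; exact (this).sum_eq
  have hzero : ((S.filter (fun k => !decide (k ∈ K))).map f).sum = 0 := by
    apply List.sum_eq_zero
    intro x hx
    simp only [List.mem_map, List.mem_filter, Bool.not_eq_true', decide_eq_false_iff_not] at hx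
    obtain ⟨k, ⟨hkS, hkK⟩, rfl⟩ := hx
    exact hz k hkS hkK
  have := hperm.map f
  rw [← hsplit, hzero, add_zero, this.sum_eq]

-- Σ over keys of pvG d equals the value-length sum of d
theorem pvSumG_keys (d : PySem.Dict (List Char) (List Char)) (hk : d.keys.Nodup) :
    (d.keys.map (pvG d)).sum = (d.values.map PySem.List.len).sum := by
  have hkeys : d.keys = d.items.map Prod.fst := by unfold PySem.Dict.keys; rfl
  have hvals : d.values = d.items.map Prod.snd := by unfold PySem.Dict.values; rfl
  rw [hkeys, hvals, List.map_map, List.map_map]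
  apply congrArg List.sum
  apply List.map_congr_left
  intro p hp
  have hget : d.get? p.1 = some p.2 :=
    PySem.Dict.get?_of_mem_items d (by simpa using hp) hk
  simp [Function.comp, pvG, hget, PySem.List.len_eq]

-- Σ over keys of pvW code ref equals the overlap sum over code's items
theorem pvSumW_keys (d e : PySem.Dict (List Char) (List Char)) (hk : d.keys.Nodup) :
    (d.keys.map (pvW d e)).sum
    = (d.items.map (fun p => if e.contains p.1 then pvOv p.2 (e.getD p.1 []) else 0)).sum := by
  have hkeys : d.keys = d.items.map Prod.fst := by unfold PySem.Dict.keys; rfl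
  rw [hkeys, List.map_map]
  apply congrArg List.sum
  apply List.map_congr_left
  intro p hp
  have hget : d.get? p.1 = some p.2 :=
    PySem.Dict.get?_of_mem_items d (by simpa using hp) hk
  simp only [Function.comp, pvW, hget]
  rw [PySem.Dict.contains_eq_isSome_get?]
  cases he : e.get? p.1 with
  | none => simp
  | some b => simp [PySem.Dict.getD_of_get?_eq_some _ _ he]

-- the three-part linearity of the per-round contribution sum
theorem pvSumSplit (S : List (List Char)) (f g h : List Char → Int) :
    (S.map (fun k => f k + g k - 2 * h k)).sum
    = (S.map f).sum + (S.map g).sum - 2 * (S.map h).sum := by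
  induction S with
  | nil => simp
  | cons x xs ih => simp only [List.map_cons, List.sum_cons, ih]; ring

-- B's subtraction loop over the items
theorem pvFoldB (l : List (List Char × List Char)) (e : PySem.Dict (List Char) (List Char))
    (t : Int) :
    l.foldl (fun t p =>
      if e.contains p.1 then
        t - 2 * PySem.List.len (p.2.filter (fun ch => (e.getD p.1 []).contains ch))
      else t) t
    = t - 2 * (l.map (fun p => if e.contains p.1 then pvOv p.2 (e.getD p.1 []) else 0)).sum := by
  induction l generalizing t with
  | nil => simp
  | cons p l ih =>
      simp only [List.foldl_cons, List.map_cons, List.sum_cons, ih]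
      by_cases hc : e.contains p.1
      · simp only [hc, if_true, pvOv]; ring
      · simp [hc]

-- A's summation loop written as a mapped sum
theorem pvFoldA (S : List (List Char)) (code reference : PySem.Dict (List Char) (List Char))
    (a : Int) :
    S.foldl (fun diff i =>
      let clc := code.get? i
      let clr := reference.get? i
      match clc, clr with
      | some a, none => diff + PySem.List.len a
      | none, some b => diff + PySem.List.len b
      | some a, some b =>
          diff + (PySem.List.len a + PySem.List.len b
            - 2 * PySem.List.len (a.filter (fun ch => b.contains ch)))
      | none, none => diff) a
    = a + (S.map (fun k => pvG code k + pvG reference k - 2 * pvW code reference k)).sum := by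
  induction S generalizing a with
  | nil => simp
  | cons x xs ih =>
      simp only [List.foldl_cons, List.map_cons, List.sum_cons, ih]
      cases hc : code.get? x <;> cases hr : reference.get? x <;>
        simp [pvG, pvW, pvOv, hc, hr, PySem.List.len_eq] <;> ring

-- ===== VERDICT (by name: the statement is the Claim_ definition above) =====
theorem CodeDistance_spec : Claim_equal_CodeDistance := by
  intro c r _ _
  unfold Spec_CodeDistance CodeDistance CodeDistance_alt
  by_cases heq : c == r
  · simp [heq]
  · simp only [heq, Bool.false_eq_true, if_false]
    rw [pvParseA, pvParseA]
    have hParseDict : ∀ (l : List (List Char)) (d : PySem.Dict (List Char) (List Char)),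
        l.foldl (fun d seg =>
          let parts := PySem.Chars.splitOn seg ['.']
          d.insert (parts.getD 0 []) (parts.getD 1 [])) d = l.foldl pvIns d := by
      intro l d
      apply PySem.List.foldl_congr_mem
      intro acc x _
      simp [pvIns, pvKey, pvVal]
    rw [hParseDict, hParseDict]
    set segsC := PySem.Chars.splitOn c.toList ['_'] with hsC
    set segsR := PySem.Chars.splitOn r.toList ['_'] with hsR
    set code := segsC.foldl pvIns PySem.Dict.empty with hcode
    set reference := segsR.foldl pvIns PySem.Dict.empty with href
    set rounds := ([] : List (List Char)) ++ segsC.map pvKey ++ segsR.map pvKey with hrounds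
    set S : List (List Char) := PySem.Set.ofList rounds with hS
    have hSnodup : S.Nodup := PySem.Set.nodup_ofList _
    have hCnodup : code.keys.Nodup := pvNodupFold _ _ (PySem.Dict.nodup_keys_empty)
    have hRnodup : reference.keys.Nodup := pvNodupFold _ _ (PySem.Dict.nodup_keys_empty)
    have hCsub : ∀ k ∈ code.keys, k ∈ S := by
      intro k hkk
      rw [hS, PySem.Set.mem_ofList, hrounds]
      have := (pvKeysFold segsC PySem.Dict.empty k).1 (hcode ▸ hkk)
      simp only [PySem.Dict.keys_empty, List.not_mem_nil, false_or] at this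
      simp [this]
    have hRsub : ∀ k ∈ reference.keys, k ∈ S := by
      intro k hkk
      rw [hS, PySem.Set.mem_ofList, hrounds]
      have := (pvKeysFold segsR PySem.Dict.empty k).1 (href ▸ hkk)
      simp only [PySem.Dict.keys_empty, List.not_mem_nil, false_or] at this
      simp [this]
    rw [pvFoldA, pvFoldB, pvSumSplit, zero_add]
    congr 1
    · congr 1
      · rw [← pvSumG_keys code hCnodup]
        apply pvSumRestrict S code.keys _ hSnodup hCnodup hCsub
        intro k _ hk
        simp [pvG, (PySem.Dict.get?_eq_none_iff_not_mem_keys code k).2 hk]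
      · rw [← pvSumG_keys reference hRnodup]
        apply pvSumRestrict S reference.keys _ hSnodup hRnodup hRsub
        intro k _ hk
        simp [pvG, (PySem.Dict.get?_eq_none_iff_not_mem_keys reference k).2 hk]
    · congr 1
      rw [← pvSumW_keys code reference hCnodup]
      apply pvSumRestrict S code.keys _ hSnodup hCnodup hCsub
      intro k _ hk
      simp [pvW, (PySem.Dict.get?_eq_none_iff_not_mem_keys code k).2 hk]
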